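-- pv_equiv track=rewrite | github.com/Chuhj/Algorithm | programmers/서버 증설 횟수/solution.py | solution
-- ===== SOURCE A (Python) =====
-- def solution(players, m, k):
--     answer = 0
--
--     # amount, start, end
--     statuses = []
--
--     current = 0
--     for index, player in enumerate(players):
--         # 제거
--         for status_index, (amount, start, end) in enumerate(statuses):
--             if index == end:
--                 statuses[status_index][2] = 0
--                 current -= amount
--
--         required = player // m
--         if required > current: # 증설
--             to_extend = required - current
--             current = current + to_extend
--             statuses.append([to_extend, index, index + k])
--             answer += to_extend
--
--     return answer
-- ===== SOURCE B (Python) =====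
-- def solution(players, m, k):
--     # One pass: adds[i] = servers added at step i; the servers added at step
--     # i-k (if any) expire exactly at step i, so no scan over past statuses.
--     adds = []
--     current = 0
--     for i, p in enumerate(players):
--         if k > 0 and i >= k:
--             current -= adds[i - k]
--         need = p // m - current
--         add = need if need > 0 else 0
--         current += add
--         adds.append(add)
--     return sum(adds)
-- ===== Notes on version B (the rewrite author's own statement) =====
-- stated objective: alternative
-- what changed: A rescans the whole list of past status records at every step (quadratic); B keeps only a list of per-step added amounts and, in one pass, subtracts adds[i-k] at step i since that batch is exactly the one expiring, returning sum(adds).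
import Mathlib
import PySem

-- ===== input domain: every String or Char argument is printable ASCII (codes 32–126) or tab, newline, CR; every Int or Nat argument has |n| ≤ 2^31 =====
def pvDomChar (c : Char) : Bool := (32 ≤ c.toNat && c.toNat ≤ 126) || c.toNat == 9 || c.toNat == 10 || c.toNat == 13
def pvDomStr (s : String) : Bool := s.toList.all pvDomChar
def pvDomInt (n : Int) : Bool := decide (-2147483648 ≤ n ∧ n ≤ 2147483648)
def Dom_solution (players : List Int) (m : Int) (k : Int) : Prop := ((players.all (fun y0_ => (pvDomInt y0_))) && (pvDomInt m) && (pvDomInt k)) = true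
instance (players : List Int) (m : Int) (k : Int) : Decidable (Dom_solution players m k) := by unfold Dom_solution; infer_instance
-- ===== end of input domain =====

-- B replaces A's per-step rescan of all past status records by a single pass
-- that subtracts the batch added k steps earlier (objective: alternative).

-- ===== PORT A =====
-- inner loop body: scan statuses, zero out and subtract the ones ending now
def innerStepA (index : Int) (acc : List (Int × Int × Int) × Int) (s : Int × Int × Int) :
    List (Int × Int × Int) × Int :=
  if index = s.2.2 then (acc.1 ++ [(s.1, s.2.1, 0)], acc.2 - s.1)
  else (acc.1 ++ [s], acc.2)

-- outer loop body of A over (index, player); state = (answer, statuses, current)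
def stepA (m k : Int) (st : Int × List (Int × Int × Int) × Int) (ip : Int × Int) :
    Int × List (Int × Int × Int) × Int :=
  let inner := st.2.1.foldl (innerStepA ip.1) ([], st.2.2)
  let required := PySem.Int.floordiv ip.2 m
  if required > inner.2 then
    (st.1 + (required - inner.2), inner.1 ++ [(required - inner.2, ip.1, ip.1 + k)],
     inner.2 + (required - inner.2))
  else (st.1, inner.1, inner.2)

def solution (players : List Int) (m : Int) (k : Int) : Int :=
  ((PySem.List.enumerate players).foldl (stepA m k) (0, [], 0)).1

-- ===== PORT B =====
-- loop body of B over (i, p); state = (adds, current).  adds[i-k] is always in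
-- range in the Python (0 ≤ i-k < len(adds)), so pyGetD with default 0 is exact.
def stepB (m k : Int) (st : List Int × Int) (ip : Int × Int) : List Int × Int :=
  let cur := if 0 < k ∧ k ≤ ip.1 then st.2 - PySem.List.pyGetD st.1 (ip.1 - k) 0 else st.2
  let need := PySem.Int.floordiv ip.2 m - cur
  let add := if 0 < need then need else 0
  (st.1 ++ [add], cur + add)

def solution_alt (players : List Int) (m : Int) (k : Int) : Int :=
  (((PySem.List.enumerate players).foldl (stepB m k) ([], 0)).1).sum

-- ===== PRECONDITION & SPEC =====
-- m = 0 makes 'player // m' raise ZeroDivisionError in A (and in B); excluded.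
def Pre_solution (players : List Int) (m : Int) (k : Int) : Prop := m ≠ 0 ∨ players = []
instance (players : List Int) (m : Int) (k : Int) : Decidable (Pre_solution players m k) := by
  unfold Pre_solution; infer_instance

def pvWitness_solution : List Int × Int × Int := ([10, 5, 7], 2, 1)

def Spec_solution (players : List Int) (m : Int) (k : Int) (out : Int) : Prop := out = solution_alt players m k
instance (players : List Int) (m : Int) (k : Int) (out : Int) : Decidable (Spec_solution players m k out) := by unfold Spec_solution; infer_instance

-- ===== CLAIM (what is proved, stated in full; the proofs are below) =====
def Claim_equal_solution : Prop := ∀ (players : List Int) (m : Int) (k : Int), Dom_solution players m k → Pre_solution players m k → Spec_solution players m k (solution players m k)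

-- ===== LEMMAS AND PROOFS =====

-- the end field A stores for a server batch added at step j, seen at step iF
def endOf (k iF j : Int) : Int := if 0 < k ∧ j + k < iF then 0 else j + k

-- the statuses list A holds at the start of step iF, reconstructed from B's adds
def mkSt (k iF : Int) : Int → List Int → List (Int × Int × Int)
  | _, [] => []
  | j, a :: rest => (if 0 < a then [(a, j, endOf k iF j)] else []) ++ mkSt k iF (j+1) rest

lemma inner_split (index : Int) (sts : List (Int × Int × Int)) :
    ∀ (pre : List (Int × Int × Int)) (c : Int),
    sts.foldl (innerStepA index) (pre, c) =
      (pre ++ sts.map (fun s => if index = s.2.2 then (s.1, s.2.1, 0) else s),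
       c - (((sts.filter (fun s => decide (index = s.2.2))).map (·.1)).sum) ) := by
  induction sts with
  | nil => intro pre c; simp
  | cons s rest ih =>
      intro pre c
      simp only [List.foldl_cons, innerStepA, List.map_cons, List.filter_cons]
      by_cases h : index = s.2.2
      · rw [if_pos h, ih]
        simp [h, sub_sub]
      · rw [if_neg h, ih]
        simp [h]

lemma mapf_mkSt (k i : Int) : ∀ (adds : List Int) (j : Int), 0 ≤ j → j + adds.length ≤ i →
    (mkSt k i j adds).map (fun s => if i = s.2.2 then (s.1, s.2.1, 0) else s) =
      mkSt k (i+1) j adds := by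
  intro adds
  induction adds with
  | nil => intro j _ _; simp [mkSt]
  | cons a rest ih =>
      intro j hj hlen
      simp only [List.length_cons] at hlen
      have hji : j < i := by omega
      have hrest := ih (j+1) (by omega) (by push_cast; omega)
      by_cases ha : 0 < a
      · simp only [mkSt, ha, if_true, List.singleton_append, List.map_cons, hrest]
        congr 1
        simp only [endOf]
        by_cases hk : 0 < k ∧ j + k < i
        · rw [if_pos hk, if_pos (show (0:Int) < k ∧ j + k < i + 1 by omega)]
          split <;> rfl
        · rw [if_neg hk]
          by_cases he : i = j + k
          · rw [if_pos (show (0:Int) < k ∧ j + k < i + 1 by omega)]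
            simp [he]
          · rw [if_neg (show ¬ ((0:Int) < k ∧ j + k < i + 1) by omega)]
            simp [he]
      · simp only [mkSt, ha, if_false, List.nil_append, hrest]

lemma sum_filter_mkSt (k i : Int) : ∀ (adds : List Int) (j : Int), 0 ≤ j →
    j + adds.length = i → (∀ a ∈ adds, 0 ≤ a) →
    (((mkSt k i j adds).filter (fun s => decide (i = s.2.2))).map (·.1)).sum =
      if 0 < k ∧ k + j ≤ i then adds.getD (i - k - j).toNat 0 else 0 := by
  intro adds
  induction adds with
  | nil =>
      intro j hj hlen _
      simp only [List.length_nil] at hlen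
      simp [mkSt, show ¬ ((0:Int) < k ∧ k + j ≤ i) by omega]
  | cons a rest ih =>
      intro j hj hlen hnn
      simp only [List.length_cons] at hlen
      have hji : j < i := by omega
      have hrest := ih (j+1) (by omega) (by push_cast; push_cast at hlen; omega)
        (fun x hx => hnn x (List.mem_cons_of_mem _ hx))
      have ha0 : 0 ≤ a := hnn a (List.mem_cons_self ..)
      by_cases he : i = j + k
      · -- the head is the (only possible) expiring entry
        have hk : 0 < k := by omega
        have hend : endOf k i j = i := by simp [endOf, he, show ¬ (j + k < i) by omega]
        have hno : ¬ ((0:Int) < k ∧ k + (j+1) ≤ i) := by omega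
        have hidx : (i - k - j).toNat = 0 := by omega
        by_cases ha : 0 < a
        · simp [mkSt, ha, hend, hrest, hidx, show (0:Int) < k ∧ k + j ≤ i by omega]
          exact fun h => absurd ⟨hk, h⟩ hno
        · have : a = 0 := by omega
          simp [mkSt, ha, hrest, hidx, this, show (0:Int) < k ∧ k + j ≤ i by omega]
          exact fun h => absurd ⟨hk, h⟩ hno
      · -- the head does not expire now
        have hend : ¬ i = endOf k i j := by
          simp only [endOf]
          by_cases hk : 0 < k ∧ j + k < i
          · simp [hk]; omega
          · simp [hk]; omega
        have hmain : (((mkSt k i j (a :: rest)).filter (fun s => decide (i = s.2.2))).map (·.1)).sum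
            = if 0 < k ∧ k + (j+1) ≤ i then rest.getD (i - k - (j+1)).toNat 0 else 0 := by
          by_cases ha : 0 < a
          · simp [mkSt, ha, hend, hrest]
          · simp [mkSt, ha, hrest]
        rw [hmain]
        by_cases hc : (0:Int) < k ∧ k + (j+1) ≤ i
        · have hc' : (0:Int) < k ∧ k + j ≤ i := by omega
          have hidx : (i - k - j).toNat = (i - k - (j+1)).toNat + 1 := by omega
          simp [hc, hc', hidx]
        · by_cases hc' : (0:Int) < k ∧ k + j ≤ i
          · -- then k + j = i, contradicting he? k + j ≤ i and ¬ k+j+1 ≤ i → k+j = i → he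
            exfalso; omega
          · simp [hc, hc']

lemma mkSt_append (k iF : Int) (a : Int) : ∀ (adds : List Int) (j : Int),
    mkSt k iF j (adds ++ [a]) =
      mkSt k iF j adds ++
        (if 0 < a then [(a, j + (adds.length : Int), endOf k iF (j + (adds.length : Int)))] else []) := by
  intro adds
  induction adds with
  | nil => intro j; simp [mkSt]
  | cons b rest ih =>
      intro j
      simp only [List.cons_append, mkSt, ih (j+1), List.length_cons]
      by_cases hb : 0 < b <;> simp [hb, List.append_assoc] <;> ring_nf

lemma main_inv (m k : Int) : ∀ (ps : List Int) (adds : List Int) (cur : Int),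
    (∀ a ∈ adds, 0 ≤ a) →
    ((PySem.List.enumerate ps (adds.length : Int)).foldl (stepA m k)
        (adds.sum, mkSt k (adds.length : Int) 0 adds, cur)).1 =
    (((PySem.List.enumerate ps (adds.length : Int)).foldl (stepB m k) (adds, cur)).1).sum := by
  intro ps
  induction ps with
  | nil => intro adds cur _; simp [PySem.List.enumerate]
  | cons p rest ih =>
      intro adds cur hnn
      set i : Int := (adds.length : Int) with hi
      simp only [PySem.List.enumerate_cons, List.foldl_cons]
      -- compute the two step results
      have hinner := inner_split i (mkSt k i 0 adds) [] cur
      have hmap := mapf_mkSt k i adds 0 (le_refl 0) (by omega)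
      have hsum := sum_filter_mkSt k i adds 0 (le_refl 0) (by omega) hnn
      have hget : (if 0 < k ∧ k ≤ i then PySem.List.pyGetD adds (i - k) 0 else 0) =
          (if 0 < k ∧ k + 0 ≤ i then adds.getD (i - k - 0).toNat 0 else 0) := by
        by_cases hc : 0 < k ∧ k ≤ i
        · have h0 : (0:Int) ≤ i - k := by omega
          rw [if_pos hc, if_pos (by omega), ← Int.toNat_of_nonneg h0,
            PySem.List.pyGetD_natCast]
          congr 2
          omega
        · rw [if_neg hc, if_neg (by omega)]
      set c : Int := cur - (if 0 < k ∧ k ≤ i then PySem.List.pyGetD adds (i - k) 0 else 0) with hc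
      have hA : (mkSt k i 0 adds).foldl (innerStepA i) ([], cur) = (mkSt k (i+1) 0 adds, c) := by
        rw [hinner, hmap, hsum, hc, hget]; simp
      have hcur : (if 0 < k ∧ k ≤ i then cur - PySem.List.pyGetD adds (i - k) 0 else cur) = c := by
        rw [hc]; by_cases h : 0 < k ∧ k ≤ i <;> simp [h]
      set add : Int := (if 0 < PySem.Int.floordiv p m - c then PySem.Int.floordiv p m - c else 0)
        with hadd
      have hB : stepB m k (adds, cur) (i, p) = (adds ++ [add], c + add) := by
        simp only [stepB, hcur, hadd]
      have hnn' : ∀ a ∈ adds ++ [add], 0 ≤ a := by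
        intro a ha
        rcases List.mem_append.mp ha with h | h
        · exact hnn a h
        · simp only [List.mem_singleton] at h
          subst h; rw [hadd]; split <;> omega
      have hlen' : ((adds ++ [add]).length : Int) = i + 1 := by simp [hi]
      have hsum' : (adds ++ [add]).sum = adds.sum + add := by simp
      have hendnew : endOf k (i+1) (0 + (adds.length : Int)) = i + k := by
        simp only [endOf, zero_add, ← hi]
        rw [if_neg (by omega)]
      have hmk := mkSt_append k (i+1) add adds 0
      rw [hendnew] at hmk
      have hstA : stepA m k (adds.sum, mkSt k i 0 adds, cur) (i, p) =
          ((adds ++ [add]).sum, mkSt k (i+1) 0 (adds ++ [add]), c + add) := by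
        simp only [stepA, hA, hsum']
        by_cases hreq : PySem.Int.floordiv p m > c
        · have ha' : add = PySem.Int.floordiv p m - c := by rw [hadd]; split <;> omega
          have hpos : 0 < add := by omega
          rw [if_pos hreq, hmk, if_pos hpos]
          simp [ha', hi]
        · have ha' : add = 0 := by rw [hadd]; split <;> omega
          rw [if_neg hreq, hmk]
          simp [ha']
      rw [hstA, hB]
      have := ih (adds ++ [add]) (c + add) hnn'
      rw [hlen'] at this
      exact this

-- ===== VERDICT (by name: the statement is the Claim_ definition above) =====
theorem solution_spec : Claim_equal_solution := by
  intro players m k _ _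
  unfold Spec_solution solution solution_alt
  have := main_inv m k players [] 0 (by intro a ha; simp at ha)
  simpa [mkSt] using this
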